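-- pv_equiv track=rewrite | github.com/lollinng/Competitive | try2.py | findBeforeMatrix
-- ===== SOURCE A (Python) =====
-- def findBeforeMatrix(after):
--
--     m = len(after[0])
--     n = len(after)
--     before = [[0 for i in range(m)] for j in range(n)]
--
--     before[0][0] = after[0][0]
--
--     for i in range(n):
--         for j in range(m):
--             if (i==0 and j==0):
--                 continue
--             elif (i == 0):
--                 before[i][j] = after[i][j] - after[i][j - 1]
--             elif (j == 0):
--                 before[i][j] = after[i][j] - after[i - 1][j]
--             else:
--                 before[i][j] = after[i][j] + after[i - 1][j - 1] - after[i - 1][j] - after[i][j - 1]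
--     return before
-- ===== SOURCE B (Python) =====
-- def findBeforeMatrix(after):
--     m = len(after[0])
--     n = len(after)
--     # pass 1: horizontal differences within each row
--     H = [[row[j] if j == 0 else row[j] - row[j - 1] for j in range(m)] for row in after]
--     # pass 2: vertical differences between consecutive rows of H
--     return [[H[i][j] if i == 0 else H[i][j] - H[i - 1][j] for j in range(m)] for i in range(n)]
-- ===== Notes on version B (the rewrite author's own statement) =====
-- stated objective: alternative
-- what changed: Replaces the single four-branch in-place sweep by two separable passes over fresh matrices: horizontal row differences, then vertical column differences; the input is never mutated.
import Mathlib
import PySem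

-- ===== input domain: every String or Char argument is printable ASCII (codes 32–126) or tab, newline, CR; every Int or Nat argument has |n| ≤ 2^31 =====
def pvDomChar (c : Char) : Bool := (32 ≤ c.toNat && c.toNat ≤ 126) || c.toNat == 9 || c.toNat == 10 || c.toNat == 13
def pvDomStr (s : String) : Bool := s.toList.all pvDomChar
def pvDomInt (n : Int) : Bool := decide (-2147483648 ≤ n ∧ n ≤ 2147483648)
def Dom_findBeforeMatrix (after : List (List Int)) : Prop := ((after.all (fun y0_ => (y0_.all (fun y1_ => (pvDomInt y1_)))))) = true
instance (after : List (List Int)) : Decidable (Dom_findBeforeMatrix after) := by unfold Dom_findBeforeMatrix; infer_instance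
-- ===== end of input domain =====

-- B replaces A's single four-branch in-place sweep by two separable passes (row differences, then
-- column differences over fresh matrices); the input is never mutated (A does not mutate it either).

-- ===== PORT A =====
-- matrix cell read `M[i][j]` (in-range under Pre_; default 0 out of range, unreachable inside Pre_)
def pvGetM (M : List (List Int)) (i j : Nat) : Int := (M.getD i []).getD j 0
-- matrix cell write `M[i][j] = v`
def pvSetM (M : List (List Int)) (i j : Nat) (v : Int) : List (List Int) :=
  M.set i ((M.getD i []).set j v)

def findBeforeMatrix (after : List (List Int)) : List (List Int) :=
  let m := (after.getD 0 []).length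
  let n := after.length
  let before0 : List (List Int) := (List.range n).map (fun _ => (List.range m).map (fun _ => (0 : Int)))
  let before1 := pvSetM before0 0 0 (pvGetM after 0 0)
  (List.range n).foldl (fun b i =>
    (List.range m).foldl (fun b j =>
      if i = 0 ∧ j = 0 then b
      else if i = 0 then pvSetM b i j (pvGetM after i j - pvGetM after i (j - 1))
      else if j = 0 then pvSetM b i j (pvGetM after i j - pvGetM after (i - 1) j)
      else pvSetM b i j (pvGetM after i j + pvGetM after (i - 1) (j - 1)
                          - pvGetM after (i - 1) j - pvGetM after i (j - 1))) b) before1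

-- ===== PORT B =====
def findBeforeMatrix_alt (after : List (List Int)) : List (List Int) :=
  let m := (after.getD 0 []).length
  let n := after.length
  let H := after.map (fun row =>
    (List.range m).map (fun j => if j = 0 then row.getD j 0 else row.getD j 0 - row.getD (j - 1) 0))
  (List.range n).map (fun i =>
    (List.range m).map (fun j => if i = 0 then pvGetM H i j else pvGetM H i j - pvGetM H (i - 1) j))

-- ===== PRECONDITION & SPEC =====
-- Pre_ excludes exactly the inputs where the Python A raises IndexError: an empty matrix, an empty
-- first row (then `before[0][0] = …` is out of range), or a row shorter than the first row.
def Pre_findBeforeMatrix (after : List (List Int)) : Prop :=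
  after ≠ [] ∧ 0 < (after.getD 0 []).length ∧
    ∀ row ∈ after, (after.getD 0 []).length ≤ row.length
instance (after : List (List Int)) : Decidable (Pre_findBeforeMatrix after) := by
  unfold Pre_findBeforeMatrix; infer_instance

def pvWitness_findBeforeMatrix : List (List Int) := [[1, 3], [2, 7]]

def Spec_findBeforeMatrix (after : List (List Int)) (out : List (List Int)) : Prop :=
  out = findBeforeMatrix_alt after
instance (after : List (List Int)) (out : List (List Int)) : Decidable (Spec_findBeforeMatrix after out) := by
  unfold Spec_findBeforeMatrix; infer_instance

-- ===== CLAIM (what is proved, stated in full; the proofs are below) =====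
def Claim_equal_findBeforeMatrix : Prop := ∀ (after : List (List Int)), Dom_findBeforeMatrix after → Pre_findBeforeMatrix after → Spec_findBeforeMatrix after (findBeforeMatrix after)

-- ===== LEMMAS AND PROOFS =====

-- the value A's loop writes at cell (i, j) (the (0,0) branch is the pre-set value)
def pvVal (after : List (List Int)) (i j : Nat) : Int :=
  if i = 0 ∧ j = 0 then pvGetM after 0 0
  else if i = 0 then pvGetM after i j - pvGetM after i (j - 1)
  else if j = 0 then pvGetM after i j - pvGetM after (i - 1) j
  else pvGetM after i j + pvGetM after (i - 1) (j - 1)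
        - pvGetM after (i - 1) j - pvGetM after i (j - 1)

-- the body of A's inner loop, named for the proofs
def pvStep (after : List (List Int)) (i : Nat) (b : List (List Int)) (j : Nat) : List (List Int) :=
  if i = 0 ∧ j = 0 then b
  else if i = 0 then pvSetM b i j (pvGetM after i j - pvGetM after i (j - 1))
  else if j = 0 then pvSetM b i j (pvGetM after i j - pvGetM after (i - 1) j)
  else pvSetM b i j (pvGetM after i j + pvGetM after (i - 1) (j - 1)
                      - pvGetM after (i - 1) j - pvGetM after i (j - 1))

lemma A_as_fold (after : List (List Int)) :
    findBeforeMatrix after =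
      (List.range after.length).foldl
        (fun b i => (List.range (after.getD 0 []).length).foldl (pvStep after i) b)
        (pvSetM ((List.range after.length).map
          (fun _ => (List.range (after.getD 0 []).length).map (fun _ => (0 : Int)))) 0 0
          (pvGetM after 0 0)) := rfl

lemma getD_set_gen {α : Type} (l : List α) (i j : Nat) (v d : α) :
    (l.set i v).getD j d = if i = j ∧ i < l.length then v else l.getD j d := by
  simp [List.getD_eq_getElem?_getD, List.getElem?_set]
  split_ifs with h1 h2 h3 <;> simp_all
  · omega

lemma length_pvSetM (M : List (List Int)) (i j : Nat) (v : Int) :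
    (pvSetM M i j v).length = M.length := by
  simp [pvSetM]

lemma rowlen_pvSetM (M : List (List Int)) (i j k : Nat) (v : Int) :
    ((pvSetM M i j v).getD k []).length = (M.getD k []).length := by
  simp only [pvSetM, getD_set_gen]
  split_ifs with h
  · obtain ⟨rfl, _⟩ := h; simp
  · rfl

lemma get_pvSetM (M : List (List Int)) (i j i' j' : Nat) (v : Int) :
    pvGetM (pvSetM M i j v) i' j' =
      if i = i' ∧ i < M.length ∧ j = j' ∧ j < (M.getD i []).length then v
      else pvGetM M i' j' := by
  simp only [pvGetM, pvSetM]
  rw [getD_set_gen]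
  by_cases hi : i = i' ∧ i < M.length
  · rw [if_pos hi, getD_set_gen]
    obtain ⟨rfl, hlen⟩ := hi
    by_cases hj : j = j' ∧ j < (M.getD i []).length
    · rw [if_pos hj, if_pos ⟨rfl, hlen, hj⟩]
    · rw [if_neg hj, if_neg (by tauto)]
  · rw [if_neg hi, if_neg (by tauto)]

lemma step_length (after : List (List Int)) (i : Nat) (b : List (List Int)) (x : Nat) :
    (pvStep after i b x).length = b.length := by
  unfold pvStep; split_ifs <;> simp [length_pvSetM]

lemma step_rowlen (after : List (List Int)) (i : Nat) (b : List (List Int)) (x k : Nat) :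
    ((pvStep after i b x).getD k []).length = (b.getD k []).length := by
  unfold pvStep; split_ifs <;> first | rfl | rw [rowlen_pvSetM]

lemma step_get (after : List (List Int)) (i x : Nat) (b : List (List Int)) (i' j' : Nat) :
    pvGetM (pvStep after i b x) i' j' =
      if i = i' ∧ x = j' ∧ ¬(i = 0 ∧ x = 0) ∧ i' < b.length ∧ j' < (b.getD i' []).length
      then pvVal after i j' else pvGetM b i' j' := by
  by_cases hC : i = i' ∧ x = j' ∧ ¬(i = 0 ∧ x = 0) ∧ i' < b.length ∧ j' < (b.getD i' []).length
  · obtain ⟨rfl, rfl, hskip, hi, hj⟩ := hC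
    rw [if_pos ⟨rfl, rfl, hskip, hi, hj⟩]
    unfold pvStep
    rw [if_neg hskip]
    by_cases h1 : i = 0
    · rw [if_pos h1, get_pvSetM, if_pos ⟨rfl, hi, rfl, hj⟩]
      simp only [pvVal, if_neg hskip, if_pos h1]
    · rw [if_neg h1]
      by_cases h2 : x = 0
      · rw [if_pos h2, get_pvSetM, if_pos ⟨rfl, hi, rfl, hj⟩]
        simp only [pvVal, if_neg hskip, if_neg h1, if_pos h2]
      · rw [if_neg h2, get_pvSetM, if_pos ⟨rfl, hi, rfl, hj⟩]
        simp only [pvVal, if_neg hskip, if_neg h1, if_neg h2]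
  · rw [if_neg hC]
    unfold pvStep
    split_ifs with h0 h1 h2 <;>
      first
      | rfl
      | · rw [get_pvSetM, if_neg ?_]
          rintro ⟨rfl, hl, rfl, hr⟩
          exact hC ⟨rfl, rfl, h0, hl, hr⟩

lemma inner_length (after : List (List Int)) (i : Nat) (l : List Nat) :
    ∀ b : List (List Int), ((l.foldl (pvStep after i) b)).length = b.length := by
  induction l with
  | nil => intro b; rfl
  | cons x t ih => intro b; rw [List.foldl_cons, ih]; exact step_length after i b x

lemma inner_rowlen (after : List (List Int)) (i : Nat) (l : List Nat) (k : Nat) :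
    ∀ b : List (List Int), (((l.foldl (pvStep after i) b)).getD k []).length = (b.getD k []).length := by
  induction l with
  | nil => intro b; rfl
  | cons x t ih => intro b; rw [List.foldl_cons, ih]; exact step_rowlen after i b x k

lemma inner_get (after : List (List Int)) (i : Nat) (l : List Nat) :
    ∀ (b : List (List Int)) (i' j' : Nat),
    pvGetM (l.foldl (pvStep after i) b) i' j' =
      if i = i' ∧ j' ∈ l ∧ ¬(i = 0 ∧ j' = 0) ∧ i' < b.length ∧ j' < (b.getD i' []).length
      then pvVal after i j' else pvGetM b i' j' := by
  induction l with
  | nil => intro b i' j'; rw [if_neg (by simp)]; rfl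
  | cons x t ih =>
    intro b i' j'
    rw [List.foldl_cons, ih, step_length, step_rowlen, step_get]
    by_cases hA : i = i' ∧ j' ∈ t ∧ ¬(i = 0 ∧ j' = 0) ∧ i' < b.length ∧ j' < (b.getD i' []).length
    · rw [if_pos hA, if_pos ⟨hA.1, List.mem_cons_of_mem x hA.2.1, hA.2.2⟩]
    · rw [if_neg hA]
      by_cases hB : i = i' ∧ x = j' ∧ ¬(i = 0 ∧ x = 0) ∧ i' < b.length ∧ j' < (b.getD i' []).length
      · rw [if_pos hB]
        obtain ⟨h1, h2, h3, h4⟩ := hB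
        subst h2
        rw [if_pos ⟨h1, List.mem_cons_self, h3, h4⟩]
      · rw [if_neg hB, if_neg ?_]
        rintro ⟨hii, hmem, hsk, hL⟩
        rcases List.mem_cons.mp hmem with h | h
        · subst h
          exact hB ⟨hii, rfl, hsk, hL⟩
        · exact hA ⟨hii, h, hsk, hL⟩

lemma outer_length (after : List (List Int)) (m : Nat) (L : List Nat) :
    ∀ b : List (List Int),
    ((L.foldl (fun b i => (List.range m).foldl (pvStep after i) b) b)).length = b.length := by
  induction L with
  | nil => intro b; rfl
  | cons x t ih => intro b; rw [List.foldl_cons, ih]; exact inner_length after x _ b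

lemma outer_rowlen (after : List (List Int)) (m : Nat) (L : List Nat) (k : Nat) :
    ∀ b : List (List Int),
    (((L.foldl (fun b i => (List.range m).foldl (pvStep after i) b) b)).getD k []).length
      = (b.getD k []).length := by
  induction L with
  | nil => intro b; rfl
  | cons x t ih => intro b; rw [List.foldl_cons, ih]; exact inner_rowlen after x _ k b

lemma outer_get (after : List (List Int)) (m : Nat) (L : List Nat) :
    ∀ (b : List (List Int)) (i' j' : Nat),
    pvGetM (L.foldl (fun b i => (List.range m).foldl (pvStep after i) b) b) i' j' =
      if i' ∈ L ∧ j' < m ∧ ¬(i' = 0 ∧ j' = 0) ∧ i' < b.length ∧ j' < (b.getD i' []).length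
      then pvVal after i' j' else pvGetM b i' j' := by
  induction L with
  | nil => intro b i' j'; rw [if_neg (by simp)]; rfl
  | cons x t ih =>
    intro b i' j'
    rw [List.foldl_cons, ih, inner_length, inner_rowlen, inner_get]
    by_cases hA : i' ∈ t ∧ j' < m ∧ ¬(i' = 0 ∧ j' = 0) ∧ i' < b.length ∧ j' < (b.getD i' []).length
    · rw [if_pos hA, if_pos ⟨List.mem_cons_of_mem x hA.1, hA.2⟩]
    · rw [if_neg hA]
      by_cases hB : x = i' ∧ j' ∈ List.range m ∧ ¬(x = 0 ∧ j' = 0) ∧ i' < b.length ∧ j' < (b.getD i' []).length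
      · rw [if_pos hB]
        obtain ⟨h1, h2, h3, h4⟩ := hB
        subst h1
        rw [if_pos ⟨List.mem_cons_self, List.mem_range.mp h2, h3, h4⟩]
      · rw [if_neg hB, if_neg ?_]
        rintro ⟨hmem, hj, hsk, hL⟩
        rcases List.mem_cons.mp hmem with h | h
        · subst h
          exact hB ⟨rfl, List.mem_range.mpr hj, hsk, hL⟩
        · exact hA ⟨h, hj, hsk, hL⟩

lemma getD_range_map {α : Type} (f : Nat → α) (n i : Nat) (d : α) (h : i < n) :
    ((List.range n).map f).getD i d = f i := by
  simp [List.getD_eq_getElem?_getD, h]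

-- A's output, cell by cell
lemma A_get (after : List (List Int))
    (i j : Nat) (hi : i < after.length) (hj : j < (after.getD 0 []).length) :
    pvGetM (findBeforeMatrix after) i j = pvVal after i j := by
  rw [A_as_fold, outer_get]
  rw [length_pvSetM, rowlen_pvSetM]
  rw [List.length_map, List.length_range]
  rw [getD_range_map _ _ _ _ hi, List.length_map, List.length_range]
  by_cases h00 : i = 0 ∧ j = 0
  · obtain ⟨rfl, rfl⟩ := h00
    rw [if_neg (by tauto)]
    rw [get_pvSetM]
    rw [List.length_map, List.length_range, getD_range_map _ _ _ _ hi,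
        List.length_map, List.length_range]
    rw [if_pos ⟨rfl, hi, rfl, hj⟩]
    simp [pvVal]
  · rw [if_pos ⟨List.mem_range.mpr hi, hj, h00, hi, hj⟩]

lemma A_length (after : List (List Int)) : (findBeforeMatrix after).length = after.length := by
  rw [A_as_fold, outer_length, length_pvSetM, List.length_map, List.length_range]

lemma A_rowlen (after : List (List Int)) (i : Nat) (hi : i < after.length) :
    ((findBeforeMatrix after).getD i []).length = (after.getD 0 []).length := by
  rw [A_as_fold, outer_rowlen, rowlen_pvSetM, getD_range_map _ _ _ _ hi,
      List.length_map, List.length_range]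

-- B's intermediate matrix H, cell by cell
lemma H_get (after : List (List Int)) (i j : Nat) (hi : i < after.length)
    (hj : j < (after.getD 0 []).length) :
    pvGetM (after.map (fun row =>
      (List.range (after.getD 0 []).length).map
        (fun j => if j = 0 then row.getD j 0 else row.getD j 0 - row.getD (j - 1) 0))) i j =
      if j = 0 then pvGetM after i j else pvGetM after i j - pvGetM after i (j - 1) := by
  unfold pvGetM
  have h1 : (after.map (fun row =>
      (List.range (after.getD 0 []).length).map
        (fun j => if j = 0 then row.getD j 0 else row.getD j 0 - row.getD (j - 1) 0))).getD i []
      = (List.range (after.getD 0 []).length).map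
        (fun j => if j = 0 then (after.getD i []).getD j 0
                  else (after.getD i []).getD j 0 - (after.getD i []).getD (j - 1) 0) := by
    rw [List.getD_eq_getElem?_getD, List.getElem?_map,
        List.getElem?_eq_getElem hi]
    simp [List.getD_eq_getElem?_getD, List.getElem?_eq_getElem hi]
  rw [h1, getD_range_map _ _ _ _ hj]

lemma B_length (after : List (List Int)) : (findBeforeMatrix_alt after).length = after.length := by
  simp [findBeforeMatrix_alt]

theorem AB_eq (after : List (List Int)) (h : Pre_findBeforeMatrix after) :
    findBeforeMatrix after = findBeforeMatrix_alt after := by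
  obtain ⟨hne, hm, hrows⟩ := h
  apply List.ext_getElem
  · rw [A_length, B_length]
  · intro i h1 h2
    have hi : i < after.length := by rwa [A_length] at h1
    have hArow : (findBeforeMatrix after)[i] = (findBeforeMatrix after).getD i [] :=
      (List.getD_eq_getElem _ _ h1).symm
    apply List.ext_getElem
    · rw [hArow, A_rowlen after i hi]
      simp [findBeforeMatrix_alt]
    · intro j hj1 hj2
      have hj : j < (after.getD 0 []).length := by
        rw [hArow, A_rowlen after i hi] at hj1; exact hj1
      have hjrow : j < ((findBeforeMatrix after).getD i []).length := by
        rw [A_rowlen after i hi]; exact hj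
      have hAe : (findBeforeMatrix after)[i][j] = pvGetM (findBeforeMatrix after) i j := by
        simp only [pvGetM]
        rw [List.getD_eq_getElem _ _ h1, List.getD_eq_getElem]
      rw [hAe, A_get after i j hi hj]
      simp only [findBeforeMatrix_alt]
      simp only [List.getElem_map, List.getElem_range]
      rw [H_get after i j hi hj]
      by_cases hi0 : i = 0
      · subst hi0
        rw [if_pos rfl]
        by_cases hj0 : j = 0 <;> simp [pvVal, hj0]
      · rw [if_neg hi0, H_get after (i - 1) j (by omega) hj]
        by_cases hj0 : j = 0
        · simp [pvVal, hi0, hj0]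
        · simp only [pvVal, hj0, hi0, and_false, if_false]
          ring

-- ===== VERDICT (by name: the statement is the Claim_ definition above) =====
theorem findBeforeMatrix_spec : Claim_equal_findBeforeMatrix := by
  intro after _ hpre
  exact AB_eq after hpre
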